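-- pv_equiv track=rewrite | github.com/alpallel/DDP-1 | kelas/Sets, Dictionaries, Randomness/quiz.py | reverse_dict
-- ===== SOURCE A (Python) =====
-- def reverse_dict(input_dict):
--     hasil = {}
--     for key in input_dict:
--         for val in input_dict[key]:
--             if val not in hasil:
--                 hasil.update({val: [key]})
--             if key not in hasil[val]:
--                 hasil[val].append(key)
--     return hasil
-- ===== SOURCE B (Python) =====
-- def reverse_dict(input_dict):
--     # Output-driven rebuild: list the values in first-appearance order, then for each
--     # value rescan the keys to collect those whose list contains it.
--     flat = [v for k in input_dict for v in input_dict[k]]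
--     return {v: [k for k in input_dict if v in input_dict[k]] for v in dict.fromkeys(flat)}
-- ===== Notes on version B (the rewrite author's own statement) =====
-- stated objective: alternative
-- what changed: Replaces A's single accumulating pass (create-or-append-if-absent into the result dict) by an output-driven rebuild: flatten all value lists, dedup with dict.fromkeys to get the result keys in first-appearance order, then compute each key list by an independent rescan of the input's keys; this trades A's incremental bookkeeping for per-value rescans, which is costlier on large inputs. Pre_ requires distinct keys because a Python dict argument cannot contain duplicate keys, so association lists with repeated keys represent no actual input of A.
import Mathlib
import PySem

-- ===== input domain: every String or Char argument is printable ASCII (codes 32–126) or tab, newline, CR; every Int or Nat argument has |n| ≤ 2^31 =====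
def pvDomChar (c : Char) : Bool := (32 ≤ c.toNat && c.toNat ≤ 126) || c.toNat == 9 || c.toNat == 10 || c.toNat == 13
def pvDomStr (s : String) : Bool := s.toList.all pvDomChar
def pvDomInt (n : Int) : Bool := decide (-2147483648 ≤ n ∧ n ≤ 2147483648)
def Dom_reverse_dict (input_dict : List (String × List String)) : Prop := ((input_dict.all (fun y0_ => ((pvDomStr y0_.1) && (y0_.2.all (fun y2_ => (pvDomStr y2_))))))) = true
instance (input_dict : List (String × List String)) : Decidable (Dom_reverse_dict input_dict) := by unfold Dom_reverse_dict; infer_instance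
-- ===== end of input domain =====

-- B rebuilds the reverse mapping output-first: it lists the values in first-appearance order
-- (dict.fromkeys of the flattened value lists) and, per value, rescans the keys to collect those
-- whose list contains it — instead of A's single accumulating pass with create-or-append-if-absent.


-- ===== PORT A =====
-- loop body of A's inner 'for val in input_dict[key]' loop, step for step
def pvStepA (key : String) (hasil : PySem.Dict String (List String)) (val : String) : PySem.Dict String (List String) :=
  let hasil := if hasil.contains val then hasil else hasil.insert val [key]   -- if val not in hasil: hasil.update({val: [key]})
  if key ∈ hasil.getD val [] then hasil else hasil.insert val (hasil.getD val [] ++ [key])  -- if key not in hasil[val]: append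

-- 'input_dict[key]' is ported as getD with default []: the key comes from the dict itself, so Python never raises here
def reverse_dict (input_dict : List (String × List String)) : List (String × List String) :=
  (input_dict.foldl
    (fun hasil kv => ((PySem.Dict.mk input_dict).getD kv.1 []).foldl (pvStepA kv.1) hasil)
    PySem.Dict.empty).items

-- ===== PORT B =====
-- flat = [v for k in input_dict for v in input_dict[k]]
-- {v: [k for k in input_dict if v in input_dict[k]] for v in dict.fromkeys(flat)}
-- dict.fromkeys(flat) is PySem.List.dedup flat; its elements are distinct, so the dict
-- comprehension never overwrites a key and is ported as a map in that order.
def reverse_dict_alt (input_dict : List (String × List String)) : List (String × List String) :=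
  let flat := input_dict.foldl (fun acc kv => acc ++ (PySem.Dict.mk input_dict).getD kv.1 []) []
  (PySem.List.dedup flat).map (fun v =>
    (v, (input_dict.filter (fun kv => decide (v ∈ (PySem.Dict.mk input_dict).getD kv.1 []))).map Prod.fst))

-- ===== PRECONDITION & SPEC =====
-- Pre_ requires distinct keys: a Python dict argument cannot contain duplicate keys, so association
-- lists with repeated keys represent no input A actually receives (the representation is ambiguous there).
def Pre_reverse_dict (input_dict : List (String × List String)) : Prop :=
  (input_dict.map Prod.fst).Nodup
instance (input_dict : List (String × List String)) : Decidable (Pre_reverse_dict input_dict) := by unfold Pre_reverse_dict; infer_instance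
def pvWitness_reverse_dict : (List (String × List String)) := [("a", ["x", "y"]), ("b", ["x"])]

def Spec_reverse_dict (input_dict : List (String × List String)) (out : List (String × List String)) : Prop := out = reverse_dict_alt input_dict
instance (input_dict : List (String × List String)) (out : List (String × List String)) : Decidable (Spec_reverse_dict input_dict out) := by unfold Spec_reverse_dict; infer_instance

-- ===== CLAIM (what is proved, stated in full; the proofs are below) =====
def Claim_equal_reverse_dict : Prop := ∀ (input_dict : List (String × List String)), Dom_reverse_dict input_dict → Pre_reverse_dict input_dict → Spec_reverse_dict input_dict (reverse_dict input_dict)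

-- ===== LEMMAS AND PROOFS =====

-- the keys (in order) whose value list contains v
def pvKeysFor (g : String → List String) (ks : List String) (v : String) : List String :=
  ks.filter (fun k => decide (v ∈ g k))

-- B's result, expressed over the key list ks and the lookup function g
def pvSpecItems (g : String → List String) (ks : List String) : List (String × List String) :=
  (PySem.List.dedup (ks.flatMap g)).map (fun v => (v, pvKeysFor g ks v))

-- A's dict items after processing keys ks and then the value prefix p of key k's list
def pvInner (g : String → List String) (ks : List String) (k : String) (p : List String) :
    List (String × List String) :=
  (PySem.List.dedup (ks.flatMap g ++ p)).map
    (fun v => (v, pvKeysFor g ks v ++ if v ∈ p then [k] else []))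

lemma pv_dedup_snoc (M : List String) (x : String) :
    PySem.List.dedup (M ++ [x]) = if x ∈ M then PySem.List.dedup M else PySem.List.dedup M ++ [x] := by
  simp only [PySem.List.dedup, PySem.Set.ofList, List.foldl_append, List.foldl_cons,
    List.foldl_nil, PySem.Set.add]
  by_cases hx : x ∈ M
  · simp [hx]; exact (PySem.Set.mem_ofList M x).mpr hx
  · simp [hx]; exact fun h => hx ((PySem.Set.mem_ofList M x).mp h)

lemma pv_find_self (v : String) (l : List String) :
    l.find? (fun u => u == v) = if v ∈ l then some v else none := by
  induction l with
  | nil => rfl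
  | cons a l ih =>
    by_cases ha : a = v
    · subst ha; simp [List.find?]
    · have hb : (a == v) = false := by simpa using ha
      have ha' : ¬ v = a := fun h => ha h.symm
      simp [List.find?, hb, ih, ha']

lemma pv_get?_of_items {D : PySem.Dict String (List String)} {S : List String}
    {h : String → List String}
    (hit : D.items = (PySem.List.dedup S).map (fun u => (u, h u))) (v : String) :
    D.get? v = if v ∈ S then some (h v) else none := by
  show (D.items.find? (fun p => p.1 == v)).map (·.2) = _
  rw [hit, List.find?_map]
  have : ((fun p : String × List String => p.1 == v) ∘ fun u => (u, h u)) = fun u => u == v := rfl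
  rw [this, pv_find_self]
  by_cases hv : v ∈ S
  · simp [hv]
  · simp [hv]

lemma pv_contains_of_items {D : PySem.Dict String (List String)} {S : List String}
    {h : String → List String}
    (hit : D.items = (PySem.List.dedup S).map (fun u => (u, h u))) (v : String) :
    D.contains v = decide (v ∈ S) := by
  rw [PySem.Dict.contains_eq_isSome_get?, pv_get?_of_items hit]
  by_cases hv : v ∈ S <;> simp [hv]

lemma pv_keysFor_nil {g : String → List String} {ks : List String} {v : String}
    (hv : v ∉ ks.flatMap g) : pvKeysFor g ks v = [] := by
  unfold pvKeysFor
  refine List.filter_eq_nil_iff.mpr ?_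
  intro k hk
  simp only [decide_eq_true_eq]
  exact fun hm => hv (List.mem_flatMap.mpr ⟨k, hk, hm⟩)

lemma pv_inner_step (g : String → List String) (ks : List String) (k : String)
    (hk : k ∉ ks) (p : List String) (v : String)
    {D : PySem.Dict String (List String)} (hD : D.items = pvInner g ks k p) :
    (pvStepA k D v).items = pvInner g ks k (p ++ [v]) := by
  unfold pvInner at hD
  have hget := pv_get?_of_items hD
  have hcon := pv_contains_of_items hD
  unfold pvStepA
  by_cases hvS : v ∈ ks.flatMap g ++ p
  · -- val already a key of hasil
    simp only [hcon v, hvS, decide_true, if_true]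
    have hgv : D.getD v [] = pvKeysFor g ks v ++ if v ∈ p then [k] else [] := by
      rw [PySem.Dict.getD_eq_get?_getD, hget v]; simp [hvS]
    by_cases hvp : v ∈ p
    · -- k already in hasil[v]: nothing changes
      have : k ∈ D.getD v [] := by rw [hgv]; simp [hvp]
      simp only [this, if_true]
      rw [hD]
      unfold pvInner
      rw [show (ks.flatMap g ++ (p ++ [v])) = (ks.flatMap g ++ p) ++ [v] by simp,
          pv_dedup_snoc, if_pos hvS]
      refine List.map_congr_left ?_
      intro u hu
      by_cases huv : u = v
      · subst huv; simp [hvp]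
      · simp [List.mem_append, huv]
    · -- v seen before from an earlier key: append k
      have hkKv : k ∉ pvKeysFor g ks v := fun hm => hk (List.mem_of_mem_filter hm)
      have : k ∉ D.getD v [] := by rw [hgv]; simp [hvp, hkKv]
      simp only [this, if_false]
      have hvF : v ∈ ks.flatMap g := by
        rcases List.mem_append.mp hvS with h | h
        · exact h
        · exact absurd h hvp
      have hcv : D.contains v = true := by rw [hcon]; simp [hvS]
      rw [PySem.Dict.items_insert_of_contains _ _ hcv, hD, List.map_map]
      unfold pvInner
      rw [show (ks.flatMap g ++ (p ++ [v])) = (ks.flatMap g ++ p) ++ [v] by simp,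
          pv_dedup_snoc, if_pos hvS]
      refine List.map_congr_left ?_
      intro u hu
      by_cases huv : u = v
      · subst huv; simp [Function.comp, hgv, hvp]
      · simp [Function.comp, huv, List.mem_append]
  · -- fresh val: insert {v: [k]}, then k ∈ [k] so no append
    have hcv : D.contains v = false := by rw [hcon]; simp [hvS]
    simp only [hcv, Bool.false_eq_true, if_false, PySem.Dict.getD_insert_self,
      List.mem_singleton, if_true]
    rw [PySem.Dict.items_insert_of_not_contains _ _ hcv, hD]
    unfold pvInner
    rw [show (ks.flatMap g ++ (p ++ [v])) = (ks.flatMap g ++ p) ++ [v] by simp,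
        pv_dedup_snoc, if_neg hvS, List.map_append]
    congr 1
    · refine List.map_congr_left ?_
      intro u hu
      have huS : u ∈ ks.flatMap g ++ p := (PySem.List.mem_dedup _ u).mp hu
      have huv : u ≠ v := fun h => hvS (h ▸ huS)
      simp [List.mem_append, huv]
    · have hvF : v ∉ ks.flatMap g := fun h => hvS (List.mem_append.mpr (Or.inl h))
      simp [pv_keysFor_nil hvF]

lemma pv_inner_fold (g : String → List String) (ks : List String) (k : String)
    (hk : k ∉ ks) (p : List String)
    {D : PySem.Dict String (List String)} (hD : D.items = pvSpecItems g ks) :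
    (p.foldl (pvStepA k) D).items = pvInner g ks k p := by
  induction p using List.reverseRecOn with
  | nil =>
    rw [List.foldl_nil, hD]
    unfold pvSpecItems pvInner
    simp
  | append_singleton p v ih =>
    rw [List.foldl_append, List.foldl_cons, List.foldl_nil]
    exact pv_inner_step g ks k hk p v ih

lemma pv_inner_done (g : String → List String) (ks : List String) (k : String) :
    pvInner g ks k (g k) = pvSpecItems g (ks ++ [k]) := by
  unfold pvInner pvSpecItems
  rw [show (ks ++ [k]).flatMap g = ks.flatMap g ++ g k by simp]
  refine List.map_congr_left ?_
  intro u hu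
  unfold pvKeysFor
  rw [List.filter_append]
  congr 1
  by_cases h : u ∈ g k <;> simp [h]

lemma pv_outer (g : String → List String) (l : List (String × List String))
    (hnd : (l.map Prod.fst).Nodup) :
    (l.foldl (fun hasil kv => (g kv.1).foldl (pvStepA kv.1) hasil) PySem.Dict.empty).items
      = pvSpecItems g (l.map Prod.fst) := by
  induction l using List.reverseRecOn with
  | nil =>
    show (PySem.Dict.empty : PySem.Dict String (List String)).items = _
    unfold pvSpecItems
    simp [PySem.Dict.empty, PySem.List.dedup, PySem.Set.ofList]
  | append_singleton l kv ih =>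
    rw [List.map_append] at hnd
    have hnd' : (l.map Prod.fst).Nodup := (List.nodup_append.mp hnd).1
    have hk : kv.1 ∉ l.map Prod.fst := by
      intro hm
      rcases List.nodup_append.mp hnd with ⟨-, -, hdisj⟩
      exact hdisj kv.1 hm kv.1 (by simp) rfl
    rw [List.foldl_append, List.foldl_cons, List.foldl_nil,
        pv_inner_fold g (l.map Prod.fst) kv.1 hk (g kv.1) (ih hnd'),
        pv_inner_done]
    simp

-- B computed over ks and g: flat = ks.flatMap g, and the filtered key list is pvKeysFor
lemma pv_alt_eq (input_dict : List (String × List String)) :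
    reverse_dict_alt input_dict
      = pvSpecItems (fun k => (PySem.Dict.mk input_dict).getD k []) (input_dict.map Prod.fst) := by
  unfold reverse_dict_alt pvSpecItems
  have hflat : input_dict.foldl
      (fun acc kv => acc ++ (PySem.Dict.mk input_dict).getD kv.1 []) []
      = (input_dict.map Prod.fst).flatMap (fun k => (PySem.Dict.mk input_dict).getD k []) := by
    rw [PySem.List.foldl_append_eq_flatMap, List.nil_append, List.flatMap_map]
  rw [hflat]
  refine List.map_congr_left ?_
  intro u hu
  unfold pvKeysFor
  rw [List.filter_map]
  rfl

-- ===== VERDICT (by name: the statement is the Claim_ definition above) =====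
theorem reverse_dict_spec : Claim_equal_reverse_dict := by
  intro input_dict _ hpre
  unfold Spec_reverse_dict reverse_dict
  rw [pv_alt_eq]
  exact pv_outer (fun k => (PySem.Dict.mk input_dict).getD k []) input_dict hpre
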